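-- pv_equiv track=rewrite | github.com/mbailey/voicemode | voice_mode/whisper_stream.py | deduplicate_transcription
-- ===== SOURCE A (Python) =====
-- from typing import Tuple, List, Optional
--
-- def deduplicate_transcription(segments: List[str]) -> str:
--     """
--     Deduplicate transcription segments from whisper-stream.
--
--     Whisper-stream can output overlapping or repeated segments as it refines
--     transcriptions. This function removes duplicates while preserving order.
--
--     Strategy:
--     1. Remove exact duplicates
--     2. If a segment is contained within a later segment, keep only the later one
--     3. Merge segments that have significant overlap
--
--     Args:
--         segments: List of transcription segments from whisper-stream
--
--     Returns:
--         Deduplicated transcription text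
--     """
--     if not segments:
--         return ""
--
--     # First pass: remove exact duplicates while preserving order
--     seen = set()
--     unique_segments = []
--     for segment in segments:
--         segment = segment.strip()
--         if segment and segment not in seen:
--             seen.add(segment)
--             unique_segments.append(segment)
--
--     if len(unique_segments) <= 1:
--         return " ".join(unique_segments)
--
--     # Second pass: remove segments that are substrings of later segments
--     filtered = []
--     for i, current in enumerate(unique_segments):
--         is_substring = False
--         # Check if this segment is a substring of any later segment
--         for later in unique_segments[i+1:]:
--             if current in later:
--                 is_substring = True
--                 break
--         if not is_substring:
--             filtered.append(current)
--
--     # Third pass: merge overlapping segments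
--     if len(filtered) <= 1:
--         return " ".join(filtered)
--
--     final = [filtered[0]]
--     for segment in filtered[1:]:
--         last = final[-1]
--         # Check for overlap at the end of last segment and beginning of current
--         words_last = last.split()
--         words_current = segment.split()
--
--         # Find overlap by checking if end of last matches beginning of current
--         overlap_found = False
--         for overlap_size in range(min(len(words_last), len(words_current)), 0, -1):
--             if words_last[-overlap_size:] == words_current[:overlap_size]:
--                 # Merge by removing the overlapping part from current segment
--                 merged = last + " " + " ".join(words_current[overlap_size:])
--                 final[-1] = merged.strip()
--                 overlap_found = True
--                 break
--
--         if not overlap_found: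
--             final.append(segment)
--
--     return " ".join(final)
-- ===== SOURCE B (Python) =====
-- def deduplicate_transcription(segments):
--     """Deduplicate transcription segments (alternative implementation)."""
--     # Pass 1: strip, drop empties, dedup keeping first occurrences
--     unique = list(dict.fromkeys(s.strip() for s in segments if s.strip()))
--     if len(unique) <= 1:
--         return " ".join(unique)
--     # Pass 2: reverse scan; a segment is kept unless it is a substring of an
--     # already-kept (i.e. later, surviving) segment — substring containment is
--     # transitive, so checking only survivors equals checking all later segments
--     kept = []
--     for seg in reversed(unique):
--         if not any(seg in k for k in kept):
--             kept.append(seg)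
--     filtered = kept[::-1]
--     if len(filtered) <= 1:
--         return " ".join(filtered)
--     # Pass 3: left fold, merging on the longest word overlap (ascending scan, keep max)
--     final = [filtered[0]]
--     for segment in filtered[1:]:
--         last = final[-1]
--         wl, wc = last.split(), segment.split()
--         best = 0
--         for k in range(1, min(len(wl), len(wc)) + 1):
--             if wl[len(wl) - k:] == wc[:k]:
--                 best = k
--         if best:
--             final[-1] = (last + " " + " ".join(wc[best:])).strip()
--         else:
--             final.append(segment)
--     return " ".join(final)
-- ===== Notes on version B (the rewrite author's own statement) =====
-- stated objective: alternative
-- what changed: Pass 1 becomes a dict.fromkeys-style ordered dedup instead of a seen-set loop; pass 2 becomes a reverse scan that tests containment only against already-kept (surviving) later segments, relying on transitivity of substring containment, instead of scanning all later segments for each element; pass 3 finds the word overlap by an ascending keep-the-maximum scan instead of a descending first-hit scan.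
import Mathlib
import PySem

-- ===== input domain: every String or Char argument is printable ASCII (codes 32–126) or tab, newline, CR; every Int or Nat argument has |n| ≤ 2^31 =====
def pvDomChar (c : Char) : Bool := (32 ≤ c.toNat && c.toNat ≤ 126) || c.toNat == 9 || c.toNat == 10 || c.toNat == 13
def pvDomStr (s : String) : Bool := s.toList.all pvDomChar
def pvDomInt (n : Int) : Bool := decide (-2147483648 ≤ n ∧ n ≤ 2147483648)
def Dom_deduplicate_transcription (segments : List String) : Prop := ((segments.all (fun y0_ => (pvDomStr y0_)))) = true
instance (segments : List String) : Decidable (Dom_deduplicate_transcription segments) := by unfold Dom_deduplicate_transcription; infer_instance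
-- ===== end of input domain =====

-- B replaces A's set-based dedup loop by dict.fromkeys-style dedup, A's forward
-- all-later substring scan by a reverse scan against kept survivors only, and A's
-- descending first-hit overlap search by an ascending keep-the-max scan (objective: alternative).

-- ===== PORT A =====
-- first pass: remove exact duplicates with a `seen` set
def pvA_step1 (st : PySem.Set String × List String) (segment0 : String) : PySem.Set String × List String :=
  let segment := PySem.Str.strip segment0
  if segment ≠ "" ∧ ¬ (st.1.contains segment = true) then (st.1.add segment, st.2 ++ [segment])
  else st

-- second pass: `for i, current in enumerate(unique)` with a lookahead over unique[i+1:]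
def pvA_step2 (unique : List String) (st : Nat × List String) (current : String) : Nat × List String :=
  let is_substring := (PySem.List.slice unique (some ((st.1 : Int) + 1)) none).any
      (fun later => PySem.Str.isIn current later)
  (st.1 + 1, if is_substring then st.2 else st.2 ++ [current])

-- `for overlap_size in range(min(len(words_last), len(words_current)), 0, -1): … break`
def pvA_overlap (wl wc : List String) : Nat → Option Nat
  | 0 => none
  | Nat.succ k =>
    if PySem.List.slice wl (some (-((k + 1 : Nat) : Int))) none
        = PySem.List.slice wc none (some ((k + 1 : Nat) : Int))
    then some (k + 1) else pvA_overlap wl wc k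

-- merge body; `final` is kept as (earlier elements, final[-1]); `a + " " + b` is " ".join([a, b])
def pvA_step3 (final : List String × String) (segment : String) : List String × String :=
  let last := final.2
  let words_last := PySem.Str.split₀ last
  let words_current := PySem.Str.split₀ segment
  match pvA_overlap words_last words_current (min words_last.length words_current.length) with
  | some overlap_size =>
      (final.1, PySem.Str.strip (PySem.Str.join " "
        [last, PySem.Str.join " " (PySem.List.slice words_current (some (overlap_size : Int)) none)]))
  | none => (final.1 ++ [last], segment)

def deduplicate_transcription (segments : List String) : String :=
  if segments = [] then ""
  else
    let unique_segments := (segments.foldl pvA_step1 (PySem.Set.empty, [])).2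
    if unique_segments.length ≤ 1 then PySem.Str.join " " unique_segments
    else
      let filtered := (unique_segments.foldl (pvA_step2 unique_segments) (0, [])).2
      if filtered.length ≤ 1 then PySem.Str.join " " filtered
      else
        match filtered with
        | [] => ""   -- unreachable: filtered.length ≥ 2
        | f0 :: rest =>
          let fin := rest.foldl pvA_step3 ([], f0)
          PySem.Str.join " " (fin.1 ++ [fin.2])

-- ===== PORT B =====
-- pass 1: list(dict.fromkeys(s.strip() for s in segments if s.strip()))
def pvB_unique (segments : List String) : List String :=
  PySem.List.dedup ((segments.map PySem.Str.strip).filter (fun s => s ≠ ""))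

-- pass 2: reverse scan, keeping a segment unless contained in an already-kept one
def pvB_keptStep (kept : List String) (seg : String) : List String :=
  if kept.any (fun k => PySem.Str.isIn seg k) then kept else kept ++ [seg]

def pvB_kept (unique : List String) : List String :=
  unique.reverse.foldl pvB_keptStep []

-- pass 3 overlap: ascending scan over range(1, min+1), remembering the last hit
def pvB_bestStep (wl : List String) (wc : List String) (best : Int) (k : Int) : Int :=
  if PySem.List.slice wl (some ((wl.length : Int) - k)) none = PySem.List.slice wc none (some k)
  then k else best

def pvB_best (wl wc : List String) : Int :=
  (PySem.List.pyRange 1 (((min wl.length wc.length : Nat) : Int) + 1)).foldl (pvB_bestStep wl wc) 0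

def pvB_step3 (final : List String × String) (segment : String) : List String × String :=
  let last := final.2
  let wl := PySem.Str.split₀ last
  let wc := PySem.Str.split₀ segment
  let best := pvB_best wl wc
  if best ≠ 0 then
    (final.1, PySem.Str.strip (PySem.Str.join " "
      [last, PySem.Str.join " " (PySem.List.slice wc (some best) none)]))
  else (final.1 ++ [last], segment)

def deduplicate_transcription_alt (segments : List String) : String :=
  let unique := pvB_unique segments
  if unique.length ≤ 1 then PySem.Str.join " " unique
  else
    let filtered := (pvB_kept unique).reverse   -- kept[::-1] (PySem.List.slice?_none_none_neg_one)
    if filtered.length ≤ 1 then PySem.Str.join " " filtered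
    else
      match filtered with
      | [] => ""   -- unreachable: filtered.length ≥ 2
      | f0 :: rest =>
        let fin := rest.foldl pvB_step3 ([], f0)
        PySem.Str.join " " (fin.1 ++ [fin.2])

-- ===== PRECONDITION & SPEC =====
def Spec_deduplicate_transcription (segments : List String) (out : String) : Prop := out = deduplicate_transcription_alt segments
instance (segments : List String) (out : String) : Decidable (Spec_deduplicate_transcription segments out) := by unfold Spec_deduplicate_transcription; infer_instance

-- ===== CLAIM (what is proved, stated in full; the proofs are below) =====
def Claim_equal_deduplicate_transcription : Prop := ∀ (segments : List String), Dom_deduplicate_transcription segments → Spec_deduplicate_transcription segments (deduplicate_transcription segments)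

-- ===== LEMMAS AND PROOFS =====

-- pass 1: A's seen/unique loop equals dict.fromkeys-style dedup of the stripped list
-- (invariant: the `seen` set and the `unique_segments` list are the same list)
theorem pv_pass1_aux (l : List String) (acc : List String) :
    (l.foldl pvA_step1 (acc, acc)).2
      = ((l.map PySem.Str.strip).filter (fun s => s ≠ "")).foldl PySem.Set.add acc := by
  induction l generalizing acc with
  | nil => simp
  | cons x xs ih =>
    simp only [List.foldl_cons, List.map_cons, List.filter_cons]
    by_cases hs : PySem.Str.strip x = ""
    · simp [pvA_step1, hs, ih]
    · by_cases hm : PySem.Str.strip x ∈ acc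
      · simp [pvA_step1, hs, hm, PySem.Set.add, ih]
      · simp [pvA_step1, hs, hm, PySem.Set.add, ih]

theorem pv_pass1_eq (segments : List String) :
    (segments.foldl pvA_step1 (PySem.Set.empty, [])).2 = pvB_unique segments := by
  have h := pv_pass1_aux segments []
  simpa [pvB_unique, PySem.List.dedup, PySem.Set.ofList, PySem.Set.empty] using h

-- the common normal form of pass 2: keep an element iff no later element contains it
def pvFilterRec : List String → List String
  | [] => []
  | c :: rest =>
    if rest.any (fun later => PySem.Str.isIn c later) then pvFilterRec rest
    else c :: pvFilterRec rest

theorem pv_pass2A_aux (l : List String) (s : List String) :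
    ∀ (k : Nat) (acc : List String), s = l.drop k →
      (s.foldl (pvA_step2 l) (k, acc)).2 = acc ++ pvFilterRec s := by
  induction s with
  | nil => intro k acc _; simp [pvFilterRec]
  | cons c t ih =>
    intro k acc hs
    have hdrop : l.drop (k + 1) = t := by
      have : (l.drop k).tail = (c :: t).tail := by rw [← hs]
      simpa [List.tail_drop] using this
    have hslice : PySem.List.slice l (some ((k : Int) + 1)) none = t := by
      have : ((k : Int) + 1) = ((k + 1 : Nat) : Int) := by push_cast; ring
      rw [this, PySem.List.slice_from_natCast, hdrop]
    simp only [List.foldl_cons, pvA_step2, hslice, pvFilterRec]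
    by_cases hc : (t.any (fun later => PySem.Str.isIn c later)) = true
    · rw [if_pos hc, if_pos hc, ih (k + 1) acc hdrop.symm]
    · rw [if_neg hc, if_neg hc, ih (k + 1) (acc ++ [c]) hdrop.symm, List.append_assoc]
      rfl

theorem pv_pass2A_eq (l : List String) :
    (l.foldl (pvA_step2 l) (0, [])).2 = pvFilterRec l := by
  simpa using pv_pass2A_aux l l 0 [] (by simp)

-- B's reverse scan: peel off the head
theorem pv_kept_cons (c : String) (rest : List String) :
    pvB_kept (c :: rest) = pvB_keptStep (pvB_kept rest) c := by
  simp [pvB_kept, List.foldl_append]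

theorem pv_kept_subset (l : List String) : ∀ x ∈ pvB_kept l, x ∈ l := by
  induction l with
  | nil => simp [pvB_kept]
  | cons c rest ih =>
    intro x hx
    rw [pv_kept_cons] at hx
    unfold pvB_keptStep at hx
    by_cases hc : ((pvB_kept rest).any (fun k => PySem.Str.isIn c k)) = true
    · rw [if_pos hc] at hx; exact List.mem_cons_of_mem _ (ih x hx)
    · rw [if_neg hc] at hx
      rcases List.mem_append.mp hx with h | h
      · exact List.mem_cons_of_mem _ (ih x h)
      · simp at h; simp [h]

-- every dropped element is contained in some kept one
theorem pv_kept_cover (l : List String) :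
    ∀ y ∈ l, ∃ z ∈ pvB_kept l, PySem.Str.isIn y z = true := by
  induction l with
  | nil => simp
  | cons c rest ih =>
    intro y hy
    rw [pv_kept_cons]
    unfold pvB_keptStep
    by_cases hc : ((pvB_kept rest).any (fun k => PySem.Str.isIn c k)) = true
    · rw [if_pos hc]
      rcases List.mem_cons.mp hy with rfl | hy'
      · rcases List.any_eq_true.mp hc with ⟨z, hz, hin⟩
        exact ⟨z, hz, hin⟩
      · exact ih y hy'
    · rw [if_neg hc]
      rcases List.mem_cons.mp hy with rfl | hy'
      · refine ⟨y, by simp, ?_⟩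
        rw [PySem.Str.isIn_iff_infix]
      · rcases ih y hy' with ⟨z, hz, hin⟩
        exact ⟨z, List.mem_append_left _ hz, hin⟩

theorem pv_isIn_trans {a b c : String} (h1 : PySem.Str.isIn a b = true)
    (h2 : PySem.Str.isIn b c = true) : PySem.Str.isIn a c = true := by
  rw [PySem.Str.isIn_iff_infix] at *
  exact h1.trans h2

-- substring containment is transitive, so testing against survivors only is enough
theorem pv_kept_any (l : List String) (c : String) :
    ((pvB_kept l).any (fun k => PySem.Str.isIn c k)) = (l.any (fun k => PySem.Str.isIn c k)) := by
  rcases Bool.eq_false_or_eq_true (l.any (fun k => PySem.Str.isIn c k)) with h | h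
  · rw [h]
    rcases List.any_eq_true.mp h with ⟨y, hy, hin⟩
    rcases pv_kept_cover l y hy with ⟨z, hz, hyz⟩
    exact List.any_eq_true.mpr ⟨z, hz, pv_isIn_trans hin hyz⟩
  · rw [h]
    rw [List.any_eq_false] at h ⊢
    intro z hz
    exact h z (pv_kept_subset l z hz)

theorem pv_pass2B_eq (l : List String) :
    (pvB_kept l).reverse = pvFilterRec l := by
  induction l with
  | nil => simp [pvB_kept, pvFilterRec]
  | cons c rest ih =>
    rw [pv_kept_cons]
    unfold pvB_keptStep pvFilterRec
    rw [pv_kept_any]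
    by_cases hc : (rest.any (fun k => PySem.Str.isIn c k)) = true
    · rw [if_pos hc, if_pos hc, ih]
    · rw [if_neg hc, if_neg hc, List.reverse_append, ← ih]
      rfl

-- pass 3: the two overlap conditions agree for 1 ≤ k ≤ wl.length
theorem pv_pred_eq (wl : List String) (k : Nat) (h1 : 1 ≤ k) (h2 : k ≤ wl.length) :
    PySem.List.slice wl (some (-(k : Int))) none
      = PySem.List.slice wl (some ((wl.length : Int) - (k : Int))) none := by
  rw [PySem.List.slice_from_neg_natCast wl k h1]
  have : ((wl.length : Int) - (k : Int)) = ((wl.length - k : Nat) : Int) := by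
    push_cast [Nat.cast_sub h2]; ring
  rw [this, PySem.List.slice_from_natCast]

def pvBfold (wl wc : List String) (m : Nat) : Int :=
  (PySem.List.pyRange 1 ((m : Int) + 1)).foldl (pvB_bestStep wl wc) 0

theorem pvBfold_zero (wl wc : List String) : pvBfold wl wc 0 = 0 := by
  unfold pvBfold
  norm_num

theorem pvBfold_succ (wl wc : List String) (m : Nat) :
    pvBfold wl wc (m + 1) = pvB_bestStep wl wc (pvBfold wl wc m) ((m : Int) + 1) := by
  unfold pvBfold
  have h : ((m + 1 : Nat) : Int) + 1 = ((m : Int) + 1) + 1 := by push_cast; ring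
  rw [h, PySem.List.pyRange_one_succ_right (by omega : (1 : Int) ≤ (m : Int) + 1), List.foldl_append]
  rfl

theorem pv_overlap_pos (wl wc : List String) : ∀ (m k : Nat), pvA_overlap wl wc m = some k → 1 ≤ k := by
  intro m
  induction m with
  | zero => intro k h; simp [pvA_overlap] at h
  | succ n ih =>
    intro k h
    unfold pvA_overlap at h
    split at h
    · injection h with h; omega
    · exact ih k h

-- A's descending first hit equals B's ascending keep-the-max (0 when there is none)
theorem pv_overlap_eq (wl wc : List String) (m : Nat) (h2 : m ≤ wl.length) :
    pvBfold wl wc m = (match pvA_overlap wl wc m with | some k => (k : Int) | none => 0) := by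
  induction m with
  | zero => simp [pvA_overlap, pvBfold_zero]
  | succ n ih =>
    rw [pvBfold_succ]
    unfold pvA_overlap pvB_bestStep
    have hpred := pv_pred_eq wl (n + 1) (by omega) h2
    have hc : ((n : Int) + 1) = ((n + 1 : Nat) : Int) := by push_cast; ring
    rw [hc, ← hpred]
    by_cases hp : PySem.List.slice wl (some (-((n + 1 : Nat) : Int))) none
        = PySem.List.slice wc none (some ((n + 1 : Nat) : Int))
    · rw [if_pos hp, if_pos hp]
    · rw [if_neg hp, if_neg hp, ih (by omega)]

theorem pv_best_none (wl wc : List String)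
    (h : pvA_overlap wl wc (min wl.length wc.length) = none) : pvB_best wl wc = 0 := by
  have hov := pv_overlap_eq wl wc (min wl.length wc.length) (Nat.min_le_left _ _)
  rw [h] at hov
  exact hov

theorem pv_best_some (wl wc : List String) (k : Nat)
    (h : pvA_overlap wl wc (min wl.length wc.length) = some k) : pvB_best wl wc = (k : Int) := by
  have hov := pv_overlap_eq wl wc (min wl.length wc.length) (Nat.min_le_left _ _)
  rw [h] at hov
  exact hov

theorem pv_step3_eq : pvA_step3 = pvB_step3 := by
  funext final segment
  unfold pvA_step3 pvB_step3
  cases h : pvA_overlap (PySem.Str.split₀ final.2) (PySem.Str.split₀ segment)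
      (min (PySem.Str.split₀ final.2).length (PySem.Str.split₀ segment).length) with
  | none =>
    have hb := pv_best_none _ _ h
    simp [h, hb]
  | some k =>
    have hb := pv_best_some _ _ _ h
    have hk1 : 1 ≤ k := pv_overlap_pos _ _ _ _ h
    simp only [h, hb]
    rw [if_pos (by exact_mod_cast (by omega : (k : Int) ≠ 0))]

-- ===== VERDICT (by name: the statement is the Claim_ definition above) =====
theorem deduplicate_transcription_spec : Claim_equal_deduplicate_transcription := by
  intro segments _dom
  unfold Spec_deduplicate_transcription deduplicate_transcription deduplicate_transcription_alt
  by_cases hseg : segments = []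
  · subst hseg
    rfl
  · rw [if_neg hseg, pv_pass1_eq]
    simp only [pv_pass2A_eq, pv_pass2B_eq, pv_step3_eq]
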